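-- pv_equiv track=rewrite | github.com/simonhughes22/PCG | src/Game.py | generate_or_variants
-- ===== SOURCE A (Python) =====
-- def generate_or_variants(tokens):
--     l_toks  = [[]]
--     for token in tokens:
--         new_l = []
--         for tok in token.split("|"):
--             for lst in l_toks:
--                 new_l.append(lst + [tok])
--         l_toks = new_l
--     return l_toks
-- ===== SOURCE B (Python) =====
-- def generate_or_variants(tokens):
--     alts = [t.split("|") for t in tokens]
--     total = 1
--     for a in alts:
--         total *= len(a)
--     result = []
--     for i in range(total):
--         x = i
--         combo = []
--         for a in alts:
--             combo.append(a[x % len(a)])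
--             x //= len(a)
--         result.append(combo)
--     return result
-- ===== Notes on version B (the rewrite author's own statement) =====
-- stated objective: faster
-- what changed: B replaces A's repeated rebuild of the whole combination list at each token by a closed-form enumeration: it decodes each index i in range(product of alternative counts) as a mixed-radix number (token 0 least significant), so no intermediate result lists are built and recopied.
import Mathlib
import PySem

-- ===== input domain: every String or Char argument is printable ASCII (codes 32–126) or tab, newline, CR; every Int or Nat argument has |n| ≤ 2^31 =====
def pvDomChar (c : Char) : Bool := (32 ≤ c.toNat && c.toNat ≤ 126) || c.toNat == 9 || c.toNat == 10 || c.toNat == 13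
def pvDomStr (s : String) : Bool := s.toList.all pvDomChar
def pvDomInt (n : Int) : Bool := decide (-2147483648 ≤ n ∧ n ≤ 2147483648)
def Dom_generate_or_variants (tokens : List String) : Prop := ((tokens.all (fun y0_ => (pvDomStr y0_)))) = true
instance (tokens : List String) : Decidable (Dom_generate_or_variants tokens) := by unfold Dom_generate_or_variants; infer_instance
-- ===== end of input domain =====

-- B enumerates indices 0..total-1 and decodes each as a mixed-radix number (token 0
-- least significant) instead of A's repeated rebuild of the whole list per token;
-- objective: alternative decomposition, same exact output.

-- ===== PORT A =====
-- Python's t.split("|") (sep ≠ "", so total); used by both ports, as both Pythons call .split("|").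
def pvSplitBar (t : String) : List String := (PySem.Chars.splitOn t.toList ['|']).map String.ofList

def generate_or_variants (tokens : List String) : List (List String) :=
  tokens.foldl (fun l_toks token =>
    (pvSplitBar token).foldl (fun new_l tok =>
      l_toks.foldl (fun new_l lst => new_l ++ [lst ++ [tok]]) new_l) []) [[]]

-- ===== PORT B =====
-- combo built left to right, one digit per token; `a.getD (x % a.length) ""` is
-- Python's `a[x % len(a)]` — exact here since split() never returns an empty list.
def pvDecodeB (alts : List (List String)) (x : Nat) : List String :=
  match alts with
  | [] => []
  | a :: rest => a.getD (x % a.length) "" :: pvDecodeB rest (x / a.length)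

def generate_or_variants_alt (tokens : List String) : List (List String) :=
  let alts := tokens.map pvSplitBar
  let total := alts.foldl (fun p a => p * a.length) 1
  (List.range total).map (fun i => pvDecodeB alts i)

-- ===== PRECONDITION & SPEC =====
def Spec_generate_or_variants (tokens : List String) (out : List (List String)) : Prop := out = generate_or_variants_alt tokens
instance (tokens : List String) (out : List (List String)) : Decidable (Spec_generate_or_variants tokens out) := by unfold Spec_generate_or_variants; infer_instance

-- ===== CLAIM (what is proved, stated in full; the proofs are below) =====
def Claim_equal_generate_or_variants : Prop := ∀ (tokens : List String), Dom_generate_or_variants tokens → Spec_generate_or_variants tokens (generate_or_variants tokens)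

-- ===== LEMMAS AND PROOFS =====

def pvProd (as : List (List String)) : Nat := (as.map List.length).prod

theorem pv_flatMap_const_nil {α β : Type} (l : List α) :
    l.flatMap (fun _ => ([] : List β)) = [] := by
  induction l <;> simp_all [List.flatMap]

def pvF (as : List (List String)) : List (List String) :=
  as.foldl (fun l a => a.flatMap (fun tok => l.map (· ++ [tok]))) [[]]

theorem pv_foldl_mul (as : List (List String)) (n : Nat) :
    as.foldl (fun p a => p * a.length) n = n * pvProd as := by
  induction as generalizing n with
  | nil => simp [pvProd]
  | cons b bs ih => simp [pvProd, List.foldl_cons, ih, List.prod_cons, mul_assoc]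

theorem pv_stepA (l : List (List String)) (a : List String) (acc : List (List String)) :
    a.foldl (fun new_l tok => l.foldl (fun nl lst => nl ++ [lst ++ [tok]]) new_l) acc
      = acc ++ a.flatMap (fun tok => l.map (· ++ [tok])) := by
  simp only [PySem.List.foldl_append_singleton_eq_map]
  exact PySem.List.foldl_append_eq_flatMap _ _ _

theorem pv_genA_eq (tokens : List String) :
    generate_or_variants tokens = pvF (tokens.map pvSplitBar) := by
  simp only [generate_or_variants, pvF, List.foldl_map]
  congr 1
  funext l t
  rw [pv_stepA]
  simp

theorem pv_F_concat (as : List (List String)) (a : List String) :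
    pvF (as ++ [a]) = a.flatMap (fun tok => (pvF as).map (· ++ [tok])) := by
  simp [pvF, List.foldl_append]

theorem pv_decode_append (as : List (List String)) (a : List String) (x : Nat) :
    pvDecodeB (as ++ [a]) x = pvDecodeB as x ++ [a.getD ((x / pvProd as) % a.length) ""] := by
  induction as generalizing x with
  | nil => simp [pvDecodeB, pvProd]
  | cons b bs ih =>
      simp only [List.cons_append, pvDecodeB, ih, pvProd, List.map_cons, List.prod_cons,
        Nat.div_div_eq_div_mul]

theorem pv_decode_mod (as : List (List String)) (q r : Nat) (h : r < pvProd as) :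
    pvDecodeB as (q * pvProd as + r) = pvDecodeB as r := by
  induction as generalizing q r with
  | nil => simp [pvDecodeB]
  | cons b bs ih =>
      have hP : pvProd (b :: bs) = b.length * pvProd bs := by
        simp [pvProd, List.prod_cons]
      rw [hP] at h ⊢
      rcases Nat.eq_zero_or_pos b.length with hc | hc
      · simp [hc] at h
      have key1 : (q * (b.length * pvProd bs) + r) % b.length = r % b.length := by
        have e : q * (b.length * pvProd bs) + r = r + (q * pvProd bs) * b.length := by ring
        rw [e, Nat.add_mul_mod_self_right]
      have key2 : (q * (b.length * pvProd bs) + r) / b.length = q * pvProd bs + r / b.length := by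
        have e : q * (b.length * pvProd bs) + r = r + (q * pvProd bs) * b.length := by ring
        rw [e, Nat.add_mul_div_right _ _ hc]
        ring
      have hrP : r / b.length < pvProd bs := by
        rw [Nat.div_lt_iff_lt_mul hc]
        calc r < b.length * pvProd bs := h
        _ = pvProd bs * b.length := Nat.mul_comm _ _
      simp only [pvDecodeB, key1, key2, ih q (r / b.length) hrP]

theorem pv_getD_range_map (a : List String) :
    (List.range a.length).map (fun q => a.getD q "") = a := by
  apply List.ext_getElem
  · simp
  · intro i h1 h2
    simp only [List.getElem_map, List.getElem_range, List.getD_eq_getElem?_getD,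
      List.getElem?_eq_getElem h2, Option.getD_some]

theorem pv_range_mul_flat (P c : Nat) :
    List.range (P * c) = (List.range c).flatMap (fun q => (List.range P).map (fun r => q * P + r)) := by
  induction c with
  | zero => simp
  | succ c ih =>
      rw [Nat.mul_succ, List.range_add, ih, List.range_succ]
      simp [mul_comm]

theorem pv_main (as : List (List String)) :
    pvF as = (List.range (pvProd as)).map (pvDecodeB as) := by
  induction as using List.reverseRecOn with
  | nil => simp [pvF, pvProd, pvDecodeB]
  | append_singleton as a ih =>
      have hPapp : pvProd (as ++ [a]) = pvProd as * a.length := by simp [pvProd]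
      rw [pv_F_concat, ih, hPapp, pv_range_mul_flat, List.map_flatMap]
      rcases Nat.eq_zero_or_pos (pvProd as) with hP0 | hPpos
      · simp [hP0, pv_flatMap_const_nil]
      have inner : ∀ q ∈ List.range a.length,
          ((List.range (pvProd as)).map (fun r => q * pvProd as + r)).map (pvDecodeB (as ++ [a]))
            = ((List.range (pvProd as)).map (pvDecodeB as)).map (· ++ [a.getD q ""]) := by
        intro q hq
        rw [List.map_map, List.map_map]
        apply List.map_congr_left
        intro r hr
        have hrP : r < pvProd as := List.mem_range.mp hr
        simp only [Function.comp]
        rw [pv_decode_append, pv_decode_mod as q r hrP]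
        have hdiv : (q * pvProd as + r) / pvProd as = q := by
          rw [Nat.mul_comm q (pvProd as), Nat.mul_add_div hPpos, Nat.div_eq_of_lt hrP]
          rfl
        rw [hdiv, Nat.mod_eq_of_lt (List.mem_range.mp hq)]
      calc a.flatMap (fun tok => ((List.range (pvProd as)).map (pvDecodeB as)).map (· ++ [tok]))
          = ((List.range a.length).map (fun q => a.getD q "")).flatMap
              (fun tok => ((List.range (pvProd as)).map (pvDecodeB as)).map (· ++ [tok])) := by
            rw [pv_getD_range_map]
        _ = (List.range a.length).flatMap
              (fun q => ((List.range (pvProd as)).map (pvDecodeB as)).map (· ++ [a.getD q ""])) := by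
            rw [List.flatMap_map]
        _ = (List.range a.length).flatMap
              (fun q => ((List.range (pvProd as)).map (fun r => q * pvProd as + r)).map (pvDecodeB (as ++ [a]))) := by
            exact (List.flatMap_congr inner).symm

-- ===== VERDICT (by name: the statement is the Claim_ definition above) =====
theorem generate_or_variants_spec : Claim_equal_generate_or_variants := by
  intro tokens _
  unfold Spec_generate_or_variants
  rw [pv_genA_eq, generate_or_variants_alt]
  simp only [pv_foldl_mul, one_mul]
  exact pv_main _
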